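-- pv_equiv track=rewrite | github.com/Beelthazad/PythonExercises | Ejercicios_Basicos/ejercicio20.py | mayor_q_Lista
-- ===== SOURCE A (Python) =====
-- def mayor_q_Lista(numero, lista):
--     contador = 0
--     for i in range(len(lista)):
--         if numero > lista[i]:
--             contador += 1
--
--     if contador == len(lista):
--         return True
--     else:
--         return False
-- ===== SOURCE B (Python) =====
-- def mayor_q_Lista(numero, lista):
--     return True if not lista else numero > max(lista)
-- ===== Notes on version B (the rewrite author's own statement) =====
-- stated objective: simpler
-- what changed: Replaces the counting loop (count elements smaller than numero, compare count to len) with a guarded maximum reduction: empty list is True, otherwise one strict comparison numero > max(lista).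
import Mathlib
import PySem

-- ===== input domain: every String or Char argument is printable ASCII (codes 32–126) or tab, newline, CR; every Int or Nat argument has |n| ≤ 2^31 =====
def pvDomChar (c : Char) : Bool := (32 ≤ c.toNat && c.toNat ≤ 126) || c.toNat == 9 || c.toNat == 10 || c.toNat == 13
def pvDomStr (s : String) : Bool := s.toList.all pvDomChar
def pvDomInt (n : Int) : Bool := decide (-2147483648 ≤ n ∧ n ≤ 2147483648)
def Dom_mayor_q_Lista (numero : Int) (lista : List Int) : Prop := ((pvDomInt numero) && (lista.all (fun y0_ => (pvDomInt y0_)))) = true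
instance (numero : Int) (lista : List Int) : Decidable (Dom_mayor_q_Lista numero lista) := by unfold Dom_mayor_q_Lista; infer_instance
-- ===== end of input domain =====

-- B replaces A's counting loop (count elements smaller than numero, compare to len) with a guarded maximum: True on the empty list, else one comparison numero > max(lista); objective: simpler.


-- ===== PORT A =====
def mayor_q_Lista (numero : Int) (lista : List Int) : Bool :=
  let contador := (PySem.List.pyRange 0 lista.length 1).foldl
    (fun c i => if numero > PySem.List.pyGetD lista i 0 then c + 1 else c) (0 : Int)
  if contador = lista.length then true else false

-- ===== PORT B =====
def mayor_q_Lista_alt (numero : Int) (lista : List Int) : Bool :=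
  match lista with
  | [] => true
  | _ => decide (numero > (PySem.List.max? lista (fun y => y)).getD 0)

-- ===== PRECONDITION & SPEC =====
def Spec_mayor_q_Lista (numero : Int) (lista : List Int) (out : Bool) : Prop := out = mayor_q_Lista_alt numero lista
instance (numero : Int) (lista : List Int) (out : Bool) : Decidable (Spec_mayor_q_Lista numero lista out) := by unfold Spec_mayor_q_Lista; infer_instance

-- ===== CLAIM (what is proved, stated in full; the proofs are below) =====
def Claim_equal_mayor_q_Lista : Prop := ∀ (numero : Int) (lista : List Int), Dom_mayor_q_Lista numero lista → Spec_mayor_q_Lista numero lista (mayor_q_Lista numero lista)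

-- ===== LEMMAS AND PROOFS =====

theorem countP_eq_length_iff_all {l : List Int} {p : Int → Bool} :
    l.countP p = l.length ↔ ∀ x ∈ l, p x = true := by
  induction l with
  | nil => simp
  | cons a t ih =>
    by_cases h : p a = true
    · simp [h, ih]
    · constructor
      · intro hc
        exfalso
        have := List.countP_le_length (p := p) (l := t)
        simp [h] at hc
        omega
      · intro hall
        exact absurd (hall a (by simp)) h

theorem max_foldl_lt_iff (numero a : Int) (t : List Int) :
    (numero > t.foldl max a) ↔ (numero > a ∧ ∀ x ∈ t, numero > x) := by
  induction t generalizing a with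
  | nil => simp
  | cons b t ih =>
    simp only [List.foldl_cons, ih, max_lt_iff]
    constructor
    · rintro ⟨⟨h1, h2⟩, h3⟩
      refine ⟨h1, ?_⟩
      intro x hx
      simp only [List.mem_cons] at hx
      rcases hx with rfl | hx
      · exact h2
      · exact h3 x hx
    · rintro ⟨h1, h2⟩
      exact ⟨⟨h1, h2 b (by simp)⟩, fun x hx => h2 x (by simp [hx])⟩

-- ===== VERDICT (by name: the statement is the Claim_ definition above) =====
theorem mayor_q_Lista_spec : Claim_equal_mayor_q_Lista := by
  intro numero lista _
  unfold Spec_mayor_q_Lista mayor_q_Lista mayor_q_Lista_alt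
  have hfold : (PySem.List.pyRange 0 (lista.length : Int) 1).foldl
      (fun c i => if numero > PySem.List.pyGetD lista i 0 then c + 1 else c) (0 : Int)
      = (lista.countP (fun x => decide (numero > x)) : Int) := by
    rw [PySem.List.foldl_pyRange_zero_pyGetD' lista 0 (fun c x => if numero > x then c + 1 else c) 0]
    rw [PySem.List.foldl_ite_add_one]
    simp
  simp only [hfold]
  match lista with
  | [] => simp
  | a :: t =>
    have hmax : PySem.List.max? (a :: t) (fun y => y) = some (t.foldl max a) :=
      PySem.List.max?_id_cons a t
    simp only [hmax, Option.getD_some]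
    by_cases h : numero > t.foldl max a
    · have hall := (max_foldl_lt_iff numero a t).mp h
      have : (a :: t).countP (fun x => decide (numero > x)) = (a :: t).length := by
        rw [countP_eq_length_iff_all]
        intro x hx
        simp only [List.mem_cons] at hx
        rcases hx with rfl | hx
        · simpa using hall.1
        · simpa using hall.2 x hx
      simp [this, h]
    · have : ¬ ((a :: t).countP (fun x => decide (numero > x)) = (a :: t).length) := by
        rw [countP_eq_length_iff_all]
        intro hall
        exact h ((max_foldl_lt_iff numero a t).mpr
          ⟨by simpa using hall a (by simp), fun x hx => by simpa using hall x (by simp [hx])⟩)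
      simp only [h]
      split
      · rename_i hc
        exfalso; apply this
        have := hc
        omega
      · rfl
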